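-- pv_equiv track=rewrite | github.com/lorenzowind/python-programming | Data Structures & Algorithms/Project Introduction/Task1.py | different_numbers_texts_calls
-- ===== SOURCE A (Python) =====
-- def get_tuples_data(texts, calls):
--     """Get tuples representing the data with the highest and the lowest size of texts or calls.
--     INPUT:
--     texts: Strings list. The incoming number, answering number, and timestamp of the messages.
--     calls: Strings list. The incoming number, answering number, timestamp, and duration of the calls.
--     OUTPUT:
--     tuples
--         The size and the data related to the highest and the lowest.
--     """
--     if len(texts) > len(calls):
--         return (len(texts), texts), (len(calls), calls)
--     else:
--         return (len(calls), calls), (len(texts), texts)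
--
-- def add_value_numbers(data, numbers, i):
--     """Add an initial value or increment the value on the dictionary, with the key beeing the telephone number.
--     INPUT:
--     data: Strings list. The texts or the calls.
--     numbers: Dictionary. The telephone numbers (key) and the quantity of texts or calls (value).
--     i: Integer. The index of the current text or call data.
--     """
--     number_send = data[1][i][0]
--     number_receive = data[1][i][1]
--     numbers[number_send] = 1 if not number_send in numbers else numbers[number_send] + 1
--     numbers[number_receive] = 1 if not number_receive in numbers else numbers[number_receive] + 1
--
-- def different_numbers_texts_calls(texts, calls):
--     """Calculates the number of different telephone numbers in texts and calls and create a message.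
--     INPUT:
--     texts: Strings list. The incoming number, answering number, and timestamp of the messages.
--     calls: Strings list. The incoming number, answering number, timestamp, and duration of the calls.
--     OUTPUT:
--     msg: The message of the different telephone numbers in texts and calls.
--     """
--     numbers = {}
--     higher_data, lower_data = get_tuples_data(texts, calls)
--     for i in range(higher_data[0]):
--         add_value_numbers(higher_data, numbers, i)
--         if i < lower_data[0]:
--             add_value_numbers(lower_data, numbers, i)
--     msg = "There are {} different telephone numbers in the records.".format(str(len(numbers)))
--     return msg
-- ===== SOURCE B (Python) =====
-- def different_numbers_texts_calls(texts, calls):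
--     """Calculates the number of different telephone numbers in texts and calls and create a message."""
--     nums = []
--     for record in texts:
--         nums.append(record[0])
--         nums.append(record[1])
--     for record in calls:
--         nums.append(record[0])
--         nums.append(record[1])
--     nums.sort()
--     count = 0
--     prev = None
--     for x in nums:
--         if x != prev:
--             count += 1
--         prev = x
--     return "There are {} different telephone numbers in the records.".format(count)
-- ===== Notes on version B (the rewrite author's own statement) =====
-- stated objective: alternative
-- what changed: Replaced A's interleaved dual-index dict-of-counts traversal (get_tuples_data/add_value_numbers) by a sort-then-scan distinct count: flatten both numbers of every record into one list, sort it, and count positions whose value differs from the previous one.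
import Mathlib
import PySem

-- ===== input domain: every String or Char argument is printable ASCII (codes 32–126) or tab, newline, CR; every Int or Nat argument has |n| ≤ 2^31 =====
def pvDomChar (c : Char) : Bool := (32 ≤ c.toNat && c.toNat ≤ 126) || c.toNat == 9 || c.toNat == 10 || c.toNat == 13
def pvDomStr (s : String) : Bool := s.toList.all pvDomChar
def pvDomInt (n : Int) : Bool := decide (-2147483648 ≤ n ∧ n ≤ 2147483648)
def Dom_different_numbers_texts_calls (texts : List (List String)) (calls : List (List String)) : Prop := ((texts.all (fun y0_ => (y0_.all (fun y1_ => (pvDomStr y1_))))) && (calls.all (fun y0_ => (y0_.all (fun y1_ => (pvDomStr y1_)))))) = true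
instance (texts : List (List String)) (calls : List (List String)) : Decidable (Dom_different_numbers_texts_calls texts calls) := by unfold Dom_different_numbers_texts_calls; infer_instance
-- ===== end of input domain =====

-- B drops A's get_tuples_data/add_value_numbers decomposition and the interleaved dual-index
-- dict-of-counts traversal: it flattens both numbers of every record into one list, sorts it,
-- and counts adjacent changes (sort-then-scan distinct count).

-- ===== PORT A =====
def get_tuples_data (texts : List (List String)) (calls : List (List String)) :
    (Nat × List (List String)) × (Nat × List (List String)) :=
  if texts.length > calls.length then ((texts.length, texts), (calls.length, calls))
  else ((calls.length, calls), (texts.length, texts))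

-- record[i][0]/record[i][1]: pyGetD is the total form of indexing, exact under Pre_ (indices in range)
def add_value_numbers (data : Nat × List (List String)) (numbers : PySem.Dict String Int) (i : Int) :
    PySem.Dict String Int :=
  let number_send := PySem.List.pyGetD (PySem.List.pyGetD data.2 i []) 0 ""
  let number_receive := PySem.List.pyGetD (PySem.List.pyGetD data.2 i []) 1 ""
  let numbers := numbers.insert number_send
    (if numbers.contains number_send = false then 1 else numbers.getD number_send 0 + 1)
  let numbers := numbers.insert number_receive
    (if numbers.contains number_receive = false then 1 else numbers.getD number_receive 0 + 1)
  numbers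

def different_numbers_texts_calls (texts : List (List String)) (calls : List (List String)) : String :=
  let td := get_tuples_data texts calls
  let higher_data := td.1
  let lower_data := td.2
  let numbers := (PySem.List.pyRange 0 (higher_data.1 : Int)).foldl
    (fun numbers i =>
      let numbers := add_value_numbers higher_data numbers i
      if i < (lower_data.1 : Int) then add_value_numbers lower_data numbers i else numbers)
    PySem.Dict.empty
  "There are " ++ PySem.Int.toStr (numbers.size : Int) ++ " different telephone numbers in the records."

-- ===== PORT B =====
def different_numbers_texts_calls_alt (texts : List (List String)) (calls : List (List String)) : String :=
  let nums := texts.foldl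
    (fun nums record => nums ++ [PySem.List.pyGetD record 0 ""] ++ [PySem.List.pyGetD record 1 ""]) []
  let nums := calls.foldl
    (fun nums record => nums ++ [PySem.List.pyGetD record 0 ""] ++ [PySem.List.pyGetD record 1 ""]) nums
  let nums := PySem.List.sorted nums (fun x => x) false
  let cp := nums.foldl
    (fun (cp : Int × Option String) x => (if cp.2 = some x then cp.1 else cp.1 + 1, some x))
    (0, none)
  "There are " ++ PySem.Int.toStr cp.1 ++ " different telephone numbers in the records."

-- ===== PRECONDITION & SPEC =====
-- Pre_ excludes exactly the inputs where Python raises IndexError (both A and B access record[0]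
-- and record[1]): some record has fewer than 2 entries.
def Pre_different_numbers_texts_calls (texts : List (List String)) (calls : List (List String)) : Prop :=
  (∀ r ∈ texts, 2 ≤ r.length) ∧ (∀ r ∈ calls, 2 ≤ r.length)
instance (texts : List (List String)) (calls : List (List String)) : Decidable (Pre_different_numbers_texts_calls texts calls) := by unfold Pre_different_numbers_texts_calls; infer_instance

def pvWitness_different_numbers_texts_calls : List (List String) × List (List String) :=
  ([["1", "2", "t"]], [["1", "3", "t", "5"]])

def Spec_different_numbers_texts_calls (texts : List (List String)) (calls : List (List String)) (out : String) : Prop := out = different_numbers_texts_calls_alt texts calls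
instance (texts : List (List String)) (calls : List (List String)) (out : String) : Decidable (Spec_different_numbers_texts_calls texts calls out) := by unfold Spec_different_numbers_texts_calls; infer_instance

-- ===== CLAIM (what is proved, stated in full; the proofs are below) =====
def Claim_equal_different_numbers_texts_calls : Prop := ∀ (texts : List (List String)) (calls : List (List String)), Dom_different_numbers_texts_calls texts calls → Pre_different_numbers_texts_calls texts calls → Spec_different_numbers_texts_calls texts calls (different_numbers_texts_calls texts calls)

-- ===== LEMMAS AND PROOFS =====

-- the two phone numbers of a record
def keys2 (r : List String) : List String :=
  [PySem.List.pyGetD r 0 "", PySem.List.pyGetD r 1 ""]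

-- A's per-key dict update, in the shape of PySem.Dict.keys_foldl_insert
def dstep (d : PySem.Dict String Int) (k : String) : PySem.Dict String Int :=
  d.insert k (if d.contains k = false then 1 else d.getD k 0 + 1)

theorem add_value_numbers_eq (data : Nat × List (List String)) (d : PySem.Dict String Int) (i : Int) :
    add_value_numbers data d i = (keys2 (PySem.List.pyGetD data.2 i [])).foldl dstep d := rfl

-- the key sequence A's interleaved loop inserts
def interKeys (hi lo : List (List String)) : List String :=
  ((List.range hi.length).map
    (fun (j : Nat) => keys2 (PySem.List.pyGetD hi (j : Int) []) ++
      (if (j : Int) < (lo.length : Int) then keys2 (PySem.List.pyGetD lo (j : Int) []) else []))).flatten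
theorem mem_keyList (xs : List (List String)) (a : String) :
    (a ∈ ((List.range xs.length).map
        (fun (i : Nat) => keys2 (PySem.List.pyGetD xs (i : Int) []))).flatten) ↔
      a ∈ (xs.map keys2).flatten := by
  simp only [List.mem_flatten, List.mem_map]
  constructor
  · rintro ⟨l, ⟨i, hi, rfl⟩, ha⟩
    rw [List.mem_range] at hi
    refine ⟨keys2 xs[i], ⟨xs[i], List.getElem_mem hi, rfl⟩, ?_⟩
    simpa [PySem.List.pyGetD_natCast, List.getD_eq_getElem?_getD, hi] using ha
  · rintro ⟨l, ⟨r, hr, rfl⟩, ha⟩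
    obtain ⟨i, hi, rfl⟩ := List.mem_iff_getElem.mp hr
    refine ⟨keys2 (PySem.List.pyGetD xs (i : Int) []), ⟨i, List.mem_range.mpr hi, rfl⟩, ?_⟩
    simpa [PySem.List.pyGetD_natCast, List.getD_eq_getElem?_getD, hi] using ha
theorem mem_interKeys (hi lo : List (List String)) (hle : lo.length ≤ hi.length) (a : String) :
    a ∈ interKeys hi lo ↔ a ∈ (hi.map keys2).flatten ∨ a ∈ (lo.map keys2).flatten := by
  rw [← mem_keyList hi a, ← mem_keyList lo a]
  unfold interKeys
  simp only [List.mem_flatten, List.mem_map]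
  constructor
  · rintro ⟨l, ⟨j, hj, rfl⟩, ha⟩
    rw [List.mem_range] at hj
    rw [List.mem_append] at ha
    rcases ha with ha | ha
    · exact Or.inl ⟨keys2 (PySem.List.pyGetD hi (j : Int) []), ⟨j, List.mem_range.mpr hj, rfl⟩, ha⟩
    · by_cases hjl : (j : Int) < (lo.length : Int)
      · rw [if_pos hjl] at ha
        have hjl' : j < lo.length := by exact_mod_cast hjl
        exact Or.inr ⟨keys2 (PySem.List.pyGetD lo (j : Int) []), ⟨j, List.mem_range.mpr hjl', rfl⟩, ha⟩
      · rw [if_neg hjl] at ha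
        simp at ha
  · rintro (⟨l, ⟨j, hj, rfl⟩, ha⟩ | ⟨l, ⟨j, hj, rfl⟩, ha⟩)
    · rw [List.mem_range] at hj
      refine ⟨_, ⟨j, List.mem_range.mpr hj, rfl⟩, ?_⟩
      rw [List.mem_append]; exact Or.inl ha
    · rw [List.mem_range] at hj
      refine ⟨_, ⟨j, List.mem_range.mpr (lt_of_lt_of_le hj hle), rfl⟩, ?_⟩
      rw [List.mem_append, if_pos (by exact_mod_cast hj)]
      exact Or.inr ha

theorem loop_body_eq (hi lo : Nat × List (List String)) (d : PySem.Dict String Int) (i : Int) :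
    (let d' := add_value_numbers hi d i;
     if i < (lo.1 : Int) then add_value_numbers lo d' i else d') =
      (keys2 (PySem.List.pyGetD hi.2 i []) ++
        (if i < (lo.1 : Int) then keys2 (PySem.List.pyGetD lo.2 i []) else [])).foldl dstep d := by
  by_cases h : i < (lo.1 : Int) <;>
    simp [h, add_value_numbers_eq, List.foldl_append]
theorem loop_eq_foldl_interKeys (hi lo : List (List String)) (d : PySem.Dict String Int) :
    (PySem.List.pyRange 0 (hi.length : Int)).foldl
      (fun numbers i =>
        let numbers := add_value_numbers (hi.length, hi) numbers i
        if i < (lo.length : Int) then add_value_numbers (lo.length, lo) numbers i else numbers) d =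
      (interKeys hi lo).foldl dstep d := by
  have h1 : (PySem.List.pyRange 0 (hi.length : Int)).foldl
      (fun numbers i =>
        let numbers := add_value_numbers (hi.length, hi) numbers i
        if i < (lo.length : Int) then add_value_numbers (lo.length, lo) numbers i else numbers) d
      = (List.range hi.length).foldl
        (fun d' (j : Nat) =>
          (keys2 (PySem.List.pyGetD hi (j : Int) []) ++
            (if (j : Int) < (lo.length : Int) then keys2 (PySem.List.pyGetD lo (j : Int) []) else [])).foldl dstep d') d := by
    rw [PySem.List.pyRange_zero_natCast, List.foldl_map]
    exact PySem.List.foldl_congr_mem _ _ _ _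
      (fun d' j _ => loop_body_eq (hi.length, hi) (lo.length, lo) d' (j : Int))
  have h2 : (List.range hi.length).foldl
        (fun d' (j : Nat) =>
          (keys2 (PySem.List.pyGetD hi (j : Int) []) ++
            (if (j : Int) < (lo.length : Int) then keys2 (PySem.List.pyGetD lo (j : Int) []) else [])).foldl dstep d') d
      = (interKeys hi lo).foldl dstep d := by
    unfold interKeys
    rw [List.foldl_flatten, List.foldl_map]
  exact h1.trans h2

theorem keys_foldl_dstep (l : List String) (d : PySem.Dict String Int) :
    (l.foldl dstep d).keys = PySem.Set.update d.keys l :=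
  PySem.Dict.keys_foldl_insert l
    (fun d k => if d.contains k = false then 1 else d.getD k 0 + 1) d

theorem dict_size_eq_keys_length (d : PySem.Dict String Int) : d.size = d.keys.length := by
  simp [PySem.Dict.size, PySem.Dict.keys]

-- A's answer, characterised: the dict built over interKeys has toFinset.card many keys
theorem ofList_length_eq_toFinset_card (xs : List String) :
    (PySem.Set.ofList xs).length = xs.toFinset.card := by
  rw [← List.toFinset_card_of_nodup (PySem.Set.nodup_ofList xs)]
  congr 1
  apply Finset.ext; intro a
  simp [PySem.Set.mem_ofList]

-- ===== B-side: flat list of keys, then sort-then-scan count =====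

theorem foldl_append_keys2 (l : List (List String)) (init : List String) :
    l.foldl (fun nums record =>
        nums ++ [PySem.List.pyGetD record 0 ""] ++ [PySem.List.pyGetD record 1 ""]) init =
      init ++ (l.map keys2).flatten := by
  induction l generalizing init with
  | nil => simp
  | cons r t ih =>
    rw [List.foldl_cons, ih]
    simp only [List.map_cons, List.flatten_cons, keys2, List.append_assoc, List.cons_append, List.nil_append]

-- B's scan step
def bstep (cp : Int × Option String) (x : String) : Int × Option String :=
  (if cp.2 = some x then cp.1 else cp.1 + 1, some x)

theorem foldl_bstep_some (l : List String) (p : String) (c : Int)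
    (hs : l.Pairwise (· ≤ ·)) (hp : ∀ y ∈ l, p ≤ y) :
    (l.foldl bstep (c, some p)).1 = c + ((l.toFinset.erase p).card : Int) := by
  induction l generalizing p c with
  | nil => simp
  | cons x xs ih =>
    rw [List.pairwise_cons] at hs
    have hx : ∀ y ∈ xs, x ≤ y := hs.1
    by_cases hpx : p = x
    · subst hpx
      have : (List.foldl bstep (c, some p) (p :: xs)).1 = (List.foldl bstep (c, some p) xs).1 := by
        simp [bstep]
      rw [this, ih p c hs.2 hx]
      congr 2
      rw [List.toFinset_cons, Finset.erase_insert_eq_erase]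
    · have hstep : List.foldl bstep (c, some p) (x :: xs) = List.foldl bstep (c + 1, some x) xs := by
        simp only [List.foldl_cons, bstep, Option.some.injEq]
        rw [if_neg hpx]
      rw [hstep, ih x (c + 1) hs.2 hx]
      have hpnot : p ∉ (x :: xs).toFinset := by
        simp only [List.toFinset_cons, Finset.mem_insert, List.mem_toFinset]
        rintro (rfl | hmem)
        · exact hpx rfl
        · exact hpx (le_antisymm (hp x (by simp)) (hx p hmem))
      rw [Finset.erase_eq_of_notMem hpnot, List.toFinset_cons]
      have hins : insert x xs.toFinset = insert x (xs.toFinset.erase x) := by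
        apply Finset.ext; intro a
        by_cases hax : a = x <;> simp [hax]
      rw [hins, Finset.card_insert_of_notMem (Finset.notMem_erase x _)]
      push_cast
      ring
theorem foldl_bstep_none (l : List String) (hs : l.Pairwise (· ≤ ·)) :
    (l.foldl bstep ((0 : Int), (none : Option String))).1 = (l.toFinset.card : Int) := by
  cases l with
  | nil => simp
  | cons x xs =>
    rw [List.pairwise_cons] at hs
    have hstep : List.foldl bstep (0, none) (x :: xs) = List.foldl bstep (1, some x) xs := by
      simp [bstep]
    rw [hstep, foldl_bstep_some xs x 1 hs.2 hs.1, List.toFinset_cons]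
    have hins : insert x xs.toFinset = insert x (xs.toFinset.erase x) := by
      apply Finset.ext; intro a
      by_cases hax : a = x <;> simp [hax]
    rw [hins, Finset.card_insert_of_notMem (Finset.notMem_erase x _)]
    push_cast
    ring

-- B's count = toFinset.card of the flat key list
theorem alt_count (nums : List String) :
    ((PySem.List.sorted nums (fun x => x) false).foldl bstep ((0 : Int), (none : Option String))).1 =
      (nums.toFinset.card : Int) := by
  have hs : (PySem.List.sorted nums (fun x => x) false).Pairwise (· ≤ ·) :=
    PySem.List.sorted_pairwise nums (fun x => x)
  rw [foldl_bstep_none _ hs]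
  congr 2
  apply Finset.ext; intro a
  simp [PySem.List.mem_sorted]

theorem count_eq (hi lo texts calls : List (List String))
    (hperm : (hi = texts ∧ lo = calls) ∨ (hi = calls ∧ lo = texts))
    (hle : lo.length ≤ hi.length) :
    (interKeys hi lo).toFinset.card = (((texts ++ calls).map keys2).flatten).toFinset.card := by
  congr 1
  apply Finset.ext; intro a
  simp only [List.mem_toFinset]
  rw [mem_interKeys hi lo hle a]
  simp only [List.map_append, List.flatten_append, List.mem_append]
  rcases hperm with ⟨rfl, rfl⟩ | ⟨rfl, rfl⟩
  · rfl
  · exact or_comm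

theorem alt_eq (texts calls : List (List String)) :
    different_numbers_texts_calls_alt texts calls =
      "There are " ++ PySem.Int.toStr (((((texts ++ calls).map keys2).flatten).toFinset.card : Nat) : Int) ++
        " different telephone numbers in the records." := by
  show "There are " ++ PySem.Int.toStr
      ((PySem.List.sorted
        (calls.foldl (fun nums record => nums ++ [PySem.List.pyGetD record 0 ""] ++ [PySem.List.pyGetD record 1 ""])
          (texts.foldl (fun nums record => nums ++ [PySem.List.pyGetD record 0 ""] ++ [PySem.List.pyGetD record 1 ""]) []))
        (fun x => x) false).foldl bstep ((0 : Int), (none : Option String))).1 ++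
      " different telephone numbers in the records." = _
  rw [foldl_append_keys2, foldl_append_keys2, alt_count]
  have hflat : ([] ++ (texts.map keys2).flatten) ++ (calls.map keys2).flatten =
      ((texts ++ calls).map keys2).flatten := by
    simp [List.map_append, List.flatten_append]
  rw [hflat]

theorem different_numbers_texts_calls_spec_aux (texts calls : List (List String)) :
    different_numbers_texts_calls texts calls = different_numbers_texts_calls_alt texts calls := by
  rw [alt_eq]
  unfold different_numbers_texts_calls get_tuples_data
  by_cases h : texts.length > calls.length <;> simp only [h, if_pos, if_neg, not_false_iff]
  · rw [loop_eq_foldl_interKeys texts calls, dict_size_eq_keys_length, keys_foldl_dstep]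
    rw [show PySem.Set.update (PySem.Dict.empty : PySem.Dict String Int).keys (interKeys texts calls) =
          PySem.Set.ofList (interKeys texts calls) from rfl]
    rw [ofList_length_eq_toFinset_card,
        count_eq texts calls texts calls (Or.inl ⟨rfl, rfl⟩) (le_of_lt h)]
  · rw [loop_eq_foldl_interKeys calls texts, dict_size_eq_keys_length, keys_foldl_dstep]
    rw [show PySem.Set.update (PySem.Dict.empty : PySem.Dict String Int).keys (interKeys calls texts) =
          PySem.Set.ofList (interKeys calls texts) from rfl]
    rw [ofList_length_eq_toFinset_card,
        count_eq calls texts texts calls (Or.inr ⟨rfl, rfl⟩) (by omega)]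

-- ===== VERDICT (by name: the statement is the Claim_ definition above) =====
theorem different_numbers_texts_calls_spec : Claim_equal_different_numbers_texts_calls := by
  intro texts calls _ _
  exact different_numbers_texts_calls_spec_aux texts calls
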